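-- pv_equiv track=rewrite | github.com/AngelAldaz/Compilador_Automatas | triplo.py | tokenizar_linea
-- ===== SOURCE A (Python) =====
-- def tokenizar_linea(linea):
--     """
--     Divide una línea en tokens, respetando strings entre comillas.
--     """
--     tokens = []
--     i = 0
--     token_actual = ""
--     en_string = False
--
--     while i < len(linea):
--         char = linea[i]
--
--         if char == '"':
--             if en_string:
--                 token_actual += char
--                 tokens.append(token_actual)
--                 token_actual = ""
--                 en_string = False
--             else:
--                 if token_actual:
--                     tokens.append(token_actual)
--                     token_actual = ""
--                 en_string = True
--                 token_actual += char
--         elif en_string: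
--             token_actual += char
--         elif char in ' \t':
--             if token_actual:
--                 tokens.append(token_actual)
--                 token_actual = ""
--         else:
--             token_actual += char
--
--         i += 1
--
--     if token_actual:
--         tokens.append(token_actual)
--
--     return tokens
-- ===== SOURCE B (Python) =====
-- def tokenizar_linea(linea):
--     """
--     Divide una linea en tokens, respetando strings entre comillas.
--     Index-jump scanner: slices whole tokens out instead of accumulating chars.
--     """
--     tokens = []
--     i, n = 0, len(linea)
--     while i < n:
--         c = linea[i]
--         if c in ' \t':
--             i += 1
--         elif c == '"':
--             j = linea.find('"', i + 1)
--             if j == -1: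
--                 tokens.append(linea[i:])
--                 i = n
--             else:
--                 tokens.append(linea[i:j + 1])
--                 i = j + 1
--         else:
--             j = i + 1
--             while j < n and linea[j] not in ' \t"':
--                 j += 1
--             tokens.append(linea[i:j])
--             i = j
--     return tokens
-- ===== Notes on version B (the rewrite author's own statement) =====
-- stated objective: faster
-- what changed: Replaced A's character-by-character accumulator state machine (token_actual/en_string flags, one 'token_actual += char' per character) with an index-jump scanner that slices each whole token out at once: skip a separator, str.find the closing quote and slice the quoted span, or scan to the next separator/quote and slice the word.
import Mathlib
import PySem

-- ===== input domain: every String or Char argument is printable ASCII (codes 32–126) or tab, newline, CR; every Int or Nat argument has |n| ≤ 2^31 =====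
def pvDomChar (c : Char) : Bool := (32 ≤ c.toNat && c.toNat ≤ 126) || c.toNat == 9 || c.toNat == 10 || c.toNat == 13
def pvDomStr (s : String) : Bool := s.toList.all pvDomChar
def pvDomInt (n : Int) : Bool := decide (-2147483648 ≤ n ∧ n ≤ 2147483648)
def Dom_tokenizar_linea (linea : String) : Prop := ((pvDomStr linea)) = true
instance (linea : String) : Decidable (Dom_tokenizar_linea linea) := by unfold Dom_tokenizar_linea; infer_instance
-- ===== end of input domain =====

-- B replaces A's char-by-char accumulator state machine by an index-jump scanner that
-- slices out each whole token (quoted span or word) in one step; objective: alternative.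

-- ===== PORT A =====
-- A's while-loop: state = (tokens, token_actual, en_string), one character per step.
def pvLoopA : List Char → List String → List Char → Bool → List String
  | [], tokens, tok, _ => tokens ++ (if tok = [] then [] else [String.ofList tok])
  | c :: rest, tokens, tok, enStr =>
    if c = '"' then
      if enStr then
        pvLoopA rest (tokens ++ [String.ofList (tok ++ [c])]) [] false
      else
        pvLoopA rest (tokens ++ (if tok = [] then [] else [String.ofList tok])) [c] true
    else if enStr then
      pvLoopA rest tokens (tok ++ [c]) enStr
    else if c = ' ' ∨ c = '\t' then
      pvLoopA rest (tokens ++ (if tok = [] then [] else [String.ofList tok])) [] enStr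
    else
      pvLoopA rest tokens (tok ++ [c]) enStr

def tokenizar_linea (linea : String) : List String :=
  pvLoopA linea.toList [] [] false

-- ===== PORT B =====
-- Source B's word-character test: linea[j] not in ' \t"'
def pvWordChar (c : Char) : Bool := c != ' ' && c != '\t' && c != '"'

-- Source B's index-jump loop over the remaining characters: skip a separator, or slice a
-- quoted span up to (and including) the next quote (to the end if unterminated), or
-- slice a maximal word of non-separator non-quote characters.
def pvSplitB : List Char → List String
  | [] => []
  | c :: rest =>
    if c = ' ' ∨ c = '\t' then pvSplitB rest
    else if c = '"' then
      let pre := rest.takeWhile (fun x => x != '"')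
      match _h : rest.drop pre.length with
      | [] => [String.ofList (c :: pre)]
      | q :: rest' => String.ofList (c :: (pre ++ [q])) :: pvSplitB rest'
    else
      let w := rest.takeWhile pvWordChar
      String.ofList (c :: w) :: pvSplitB (rest.drop w.length)
termination_by chars => chars.length
decreasing_by
  all_goals simp_all
  all_goals (try (have := congrArg List.length _h; simp at this))
  all_goals omega

def tokenizar_linea_alt (linea : String) : List String :=
  pvSplitB linea.toList

-- ===== PRECONDITION & SPEC =====
def Spec_tokenizar_linea (linea : String) (out : List String) : Prop := out = tokenizar_linea_alt linea
instance (linea : String) (out : List String) : Decidable (Spec_tokenizar_linea linea out) := by unfold Spec_tokenizar_linea; infer_instance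

-- ===== CLAIM (what is proved, stated in full; the proofs are below) =====
def Claim_equal_tokenizar_linea : Prop := ∀ (linea : String), Dom_tokenizar_linea linea → Spec_tokenizar_linea linea (tokenizar_linea linea)

-- ===== LEMMAS AND PROOFS =====

-- unfolding lemmas for B's scanner
lemma pvSplitB_sep (c : Char) (rest : List Char) (h : c = ' ' ∨ c = '\t') :
    pvSplitB (c :: rest) = pvSplitB rest := by
  rw [pvSplitB]; simp [h]

lemma pvSplitB_quote_nil (rest : List Char)
    (hd : rest.drop (rest.takeWhile (fun x => x != '"')).length = []) :
    pvSplitB ('"' :: rest) = [String.ofList ('"' :: rest.takeWhile (fun x => x != '"'))] := by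
  rw [pvSplitB]
  simp only [show ¬(('"':Char) = ' ' ∨ ('"':Char) = '\t') by decide, reduceIte]
  split <;> simp_all

lemma pvSplitB_quote_cons (rest : List Char) (q : Char) (rest' : List Char)
    (hd : rest.drop (rest.takeWhile (fun x => x != '"')).length = q :: rest') :
    pvSplitB ('"' :: rest) =
      String.ofList ('"' :: (rest.takeWhile (fun x => x != '"') ++ [q])) :: pvSplitB rest' := by
  rw [pvSplitB]
  simp only [show ¬(('"':Char) = ' ' ∨ ('"':Char) = '\t') by decide, reduceIte]
  split <;> simp_all

lemma pvSplitB_word (c : Char) (rest : List Char) (h : pvWordChar c = true) :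
    pvSplitB (c :: rest) =
      String.ofList (c :: rest.takeWhile pvWordChar)
        :: pvSplitB (rest.drop (rest.takeWhile pvWordChar).length) := by
  simp only [pvWordChar, Bool.and_eq_true, bne_iff_ne] at h
  rw [pvSplitB]; simp [h.1.1, h.1.2, h.2]

-- A's loop, in each of its three reachable states, produces B's remaining tokens.
lemma pvMain : ∀ chars : List Char,
    (∀ tokens, pvLoopA chars tokens [] false = tokens ++ pvSplitB chars) ∧
    (∀ tokens tok, tok ≠ [] →
      pvLoopA chars tokens tok false =
        tokens ++ String.ofList (tok ++ chars.takeWhile pvWordChar)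
          :: pvSplitB (chars.drop (chars.takeWhile pvWordChar).length)) ∧
    (∀ tokens tok, tok ≠ [] →
      pvLoopA chars tokens tok true =
        tokens ++
          match chars.drop (chars.takeWhile (fun x => x != '"')).length with
          | [] => [String.ofList (tok ++ chars.takeWhile (fun x => x != '"'))]
          | q :: rest' =>
              String.ofList (tok ++ chars.takeWhile (fun x => x != '"') ++ [q]) :: pvSplitB rest') := by
  intro chars
  induction chars with
  | nil =>
    refine ⟨?_, ?_, ?_⟩ <;> intros <;> simp_all [pvLoopA, pvSplitB]
  | cons c rest ih =>
    obtain ⟨ih1, ih2, ih3⟩ := ih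
    refine ⟨?_, ?_, ?_⟩
    · intro tokens
      rw [pvLoopA]
      by_cases hq : c = '"'
      · subst hq
        simp only [reduceIte, List.append_nil]
        rw [ih3 tokens ['"'] (by simp)]
        cases hd : rest.drop (rest.takeWhile (fun x => x != '"')).length with
        | nil => rw [pvSplitB_quote_nil rest hd]; simp
        | cons q rest' => rw [pvSplitB_quote_cons rest q rest' hd]; simp
      · by_cases hsep : c = ' ' ∨ c = '\t'
        · simp only [hq, reduceIte, if_pos hsep, List.append_nil]
          rw [ih1, pvSplitB_sep c rest hsep]
          simp
        · rw [not_or] at hsep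
          have hw : pvWordChar c = true := by
            simp [pvWordChar, hq, hsep.1, hsep.2]
          simp only [hq, reduceIte, if_neg (by tauto : ¬(c = ' ' ∨ c = '\t')), List.nil_append]
          rw [ih2 tokens [c] (by simp), pvSplitB_word c rest hw]
          simp
    · intro tokens tok htok
      rw [pvLoopA]
      by_cases hq : c = '"'
      · subst hq
        simp only [reduceIte, if_neg htok, List.takeWhile_cons,
          show pvWordChar '"' = false by decide, Bool.false_eq_true, reduceIte,
          List.length_nil, List.drop_zero]
        rw [ih3 (tokens ++ [String.ofList tok]) ['"'] (by simp)]
        cases hd : rest.drop (rest.takeWhile (fun x => x != '"')).length with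
        | nil => rw [pvSplitB_quote_nil rest hd]; simp
        | cons q rest' => rw [pvSplitB_quote_cons rest q rest' hd]; simp
      · by_cases hsep : c = ' ' ∨ c = '\t'
        · have hwc : pvWordChar c = false := by
            rcases hsep with h | h <;> simp [pvWordChar, h]
          simp only [hq, reduceIte, if_pos hsep, if_neg htok, List.takeWhile_cons, hwc,
            Bool.false_eq_true, List.length_nil, List.drop_zero]
          rw [ih1, pvSplitB_sep c rest hsep]
          simp
        · rw [not_or] at hsep
          have hw : pvWordChar c = true := by
            simp [pvWordChar, hq, hsep.1, hsep.2]
          simp only [hq, reduceIte, if_neg (by tauto : ¬(c = ' ' ∨ c = '\t')),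
            List.takeWhile_cons, hw]
          rw [ih2 tokens (tok ++ [c]) (by simp)]
          simp
    · intro tokens tok htok
      rw [pvLoopA]
      by_cases hq : c = '"'
      · subst hq
        simp only [reduceIte, List.takeWhile_cons, show (('"' : Char) != '"') = false by decide,
          Bool.false_eq_true, List.length_nil, List.drop_zero]
        rw [ih1]
        simp
      · have hb : (c != '"') = true := by simp [hq]
        simp only [hq, reduceIte, List.takeWhile_cons, hb, List.length_cons,
          List.drop_succ_cons]
        rw [ih3 tokens (tok ++ [c]) (by simp)]
        cases rest.drop (rest.takeWhile (fun x => x != '"')).length <;> simp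

theorem tokenizar_linea_spec : Claim_equal_tokenizar_linea := by
  intro linea _
  unfold Spec_tokenizar_linea tokenizar_linea tokenizar_linea_alt
  exact (pvMain linea.toList).1 []
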